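-- pv_equiv track=rewrite | github.com/P4ulW/aoc2024 | day20/day20.py | track_from_path
-- ===== SOURCE A (Python) =====
-- Point = tuple[int, int]
--
-- DIRECTIONS = {
--     'L' : (0, 1),
--     'R' : (0, -1),
--     'U' : (-1, 0),
--     'D' : (1, 0),
-- }
--
-- def track_from_path(
--         path: str,
--         start: Point,
-- ):
--     track = [start]
--     y, x = start
--     for char in path:
--         dy, dx = DIRECTIONS[char]
--         y, x = y+dy, x+dx
--         track.append((y, x))
--     return track
-- ===== SOURCE B (Python) =====
-- from itertools import accumulate
--
-- DIRECTIONS = {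
--     'L' : (0, 1),
--     'R' : (0, -1),
--     'U' : (-1, 0),
--     'D' : (1, 0),
-- }
--
-- def track_from_path(path, start):
--     ds = [DIRECTIONS[c] for c in path]
--     ys = accumulate((dy for dy, _ in ds), initial=start[0])
--     xs = accumulate((dx for _, dx in ds), initial=start[1])
--     return list(zip(ys, xs))
-- ===== Notes on version B (the rewrite author's own statement) =====
-- stated objective: idiomatic
-- what changed: Replaces the single mutable (y,x) loop with two independent prefix-sum scans (itertools.accumulate) over the per-axis deltas, zipped into the point list.
import Mathlib
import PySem

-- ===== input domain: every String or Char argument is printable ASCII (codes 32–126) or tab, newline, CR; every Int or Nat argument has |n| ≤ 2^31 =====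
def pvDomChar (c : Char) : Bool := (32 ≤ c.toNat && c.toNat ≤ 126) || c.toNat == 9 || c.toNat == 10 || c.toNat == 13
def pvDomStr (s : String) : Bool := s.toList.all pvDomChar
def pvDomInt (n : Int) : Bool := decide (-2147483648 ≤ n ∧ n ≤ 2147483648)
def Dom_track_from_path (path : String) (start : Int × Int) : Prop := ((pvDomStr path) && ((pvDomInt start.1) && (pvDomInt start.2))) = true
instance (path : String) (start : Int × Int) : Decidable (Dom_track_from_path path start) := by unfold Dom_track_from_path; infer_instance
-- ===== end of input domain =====

-- B replaces A's single mutable (y,x) loop by two independent per-axis prefix-sum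
-- scans zipped together (idiomatic; same cost).

-- the module constant DIRECTIONS (shared by both sources)
def pvDirections : PySem.Dict Char (Int × Int) :=
  PySem.Dict.ofList [('L', ((0:Int), (1:Int))), ('R', (0, -1)), ('U', (-1, 0)), ('D', (1, 0))]

-- DIRECTIONS[char]; Python raises KeyError on other chars — Pre_ excludes those inputs
def pvDir (c : Char) : Int × Int := (PySem.Dict.get? pvDirections c).getD (0, 0)

-- ===== PORT A =====
-- the for-loop over path, carrying (y, x) and appending each new point
def trackLoop : List Char → Int → Int → List (Int × Int)
  | [], _, _ => []
  | c :: cs, y, x =>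
    let d := pvDir c
    (y + d.1, x + d.2) :: trackLoop cs (y + d.1) (x + d.2)

def track_from_path (path : String) (start : Int × Int) : List (Int × Int) :=
  start :: trackLoop path.toList start.1 start.2

-- ===== PORT B =====
def track_from_path_alt (path : String) (start : Int × Int) : List (Int × Int) :=
  let ds := path.toList.map pvDir
  let ys := List.scanl (· + ·) start.1 (ds.map Prod.fst)
  let xs := List.scanl (· + ·) start.2 (ds.map Prod.snd)
  ys.zip xs

-- ===== PRECONDITION & SPEC =====
-- Pre_ excludes paths containing a character other than L/R/U/D, on which A (and B) raise KeyError
def Pre_track_from_path (path : String) (start : Int × Int) : Prop :=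
  (path.toList.all (fun c => c == 'L' || c == 'R' || c == 'U' || c == 'D')) = true
instance (path : String) (start : Int × Int) : Decidable (Pre_track_from_path path start) := by
  unfold Pre_track_from_path; infer_instance

def pvWitness_track_from_path : String × (Int × Int) := ("LU", (3, -2))

def Spec_track_from_path (path : String) (start : Int × Int) (out : List (Int × Int)) : Prop := out = track_from_path_alt path start
instance (path : String) (start : Int × Int) (out : List (Int × Int)) : Decidable (Spec_track_from_path path start out) := by unfold Spec_track_from_path; infer_instance

-- ===== CLAIM (what is proved, stated in full; the proofs are below) =====
def Claim_equal_track_from_path : Prop := ∀ (path : String) (start : Int × Int), Dom_track_from_path path start → Pre_track_from_path path start → Spec_track_from_path path start (track_from_path path start)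

-- ===== LEMMAS AND PROOFS =====

theorem zip_scanl_eq_trackLoop (cs : List Char) (y x : Int) :
    (List.scanl (· + ·) y ((cs.map pvDir).map Prod.fst)).zip
      (List.scanl (· + ·) x ((cs.map pvDir).map Prod.snd))
    = (y, x) :: trackLoop cs y x := by
  induction cs generalizing y x with
  | nil => simp [trackLoop]
  | cons c cs ih =>
    simp only [List.map_cons, List.scanl_cons, trackLoop, List.zip_cons_cons]
    simpa [List.map_map] using congrArg (List.cons (y + (pvDir c).1, x + (pvDir c).2))
      (ih (y + (pvDir c).1) (x + (pvDir c).2))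

-- ===== VERDICT (by name: the statement is the Claim_ definition above) =====
theorem track_from_path_spec : Claim_equal_track_from_path := by
  intro path start _ _
  unfold Spec_track_from_path track_from_path track_from_path_alt
  exact (zip_scanl_eq_trackLoop path.toList start.1 start.2).symm
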